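-- pv_equiv track=rewrite | github.com/AvrilMZ/Teoria_de_Algoritmos | Actividades/RPL/2 - Greedy/ej14.py | submarinos
-- ===== SOURCE A (Python) =====
-- def comparten_area(submarino, faro, filas, columnas):
-- 	x2, y2 = faro
--
-- 	area = [(x, y) for x in range(max(0, x2 - 2), min(filas, x2 + 3))
-- 			for y in range(max(0, y2 - 2), min(columnas, y2 + 3))]
--
-- 	return submarino in area
--
-- def esta_iluminado(submarino, faros, filas, columnas):
-- 	if len(faros) == 0:
-- 		return False
--
-- 	for faro in faros:
-- 		if comparten_area(submarino, faro, filas, columnas):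
-- 			return True
--
-- 	return False
--
-- def submarinos(matriz):
-- 	if len(matriz) == 0:
-- 		return []
--
-- 	filas = len(matriz)
-- 	columnas = len(matriz[0])
-- 	faros = []
--
-- 	for i in range(0, filas):
-- 		for j in range(0, columnas):
-- 			submarino = matriz[i][j]
-- 			if submarino and not esta_iluminado((i,j), faros, filas, columnas):
-- 				if i + 2 < filas and j + 2 < columnas:
-- 					faros.append((i+2,j+2))
-- 				else:
-- 					faros.append((i,j))
--
-- 	return faros
-- ===== SOURCE B (Python) =====
-- def submarinos(matriz):
-- 	if len(matriz) == 0: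
-- 		return []
--
-- 	filas = len(matriz)
-- 	columnas = len(matriz[0])
-- 	lit = [[False] * columnas for _ in range(filas)]
-- 	faros = []
--
-- 	for i, fila in enumerate(matriz):
-- 		for j in range(columnas):
-- 			if fila[j] and not lit[i][j]:
-- 				if i + 2 < filas and j + 2 < columnas:
-- 					x, y = i + 2, j + 2
-- 				else:
-- 					x, y = i, j
-- 				faros.append((x, y))
-- 				for a in range(max(0, x - 2), min(filas, x + 3)):
-- 					fila_lit = lit[a]
-- 					for b in range(max(0, y - 2), min(columnas, y + 3)):
-- 						fila_lit[b] = True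
--
-- 	return faros
-- ===== Notes on version B (the rewrite author's own statement) =====
-- stated objective: faster
-- what changed: Instead of re-scanning the whole list of placed lighthouses and rebuilding each lighthouse's 5x5 area list for every cell, B keeps a boolean lit-cell grid, stamps each new lighthouse's clipped 5x5 box into it once, and tests illumination by one O(1) grid lookup; it also iterates rows by enumerate instead of indexed range loops.
import Mathlib
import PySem

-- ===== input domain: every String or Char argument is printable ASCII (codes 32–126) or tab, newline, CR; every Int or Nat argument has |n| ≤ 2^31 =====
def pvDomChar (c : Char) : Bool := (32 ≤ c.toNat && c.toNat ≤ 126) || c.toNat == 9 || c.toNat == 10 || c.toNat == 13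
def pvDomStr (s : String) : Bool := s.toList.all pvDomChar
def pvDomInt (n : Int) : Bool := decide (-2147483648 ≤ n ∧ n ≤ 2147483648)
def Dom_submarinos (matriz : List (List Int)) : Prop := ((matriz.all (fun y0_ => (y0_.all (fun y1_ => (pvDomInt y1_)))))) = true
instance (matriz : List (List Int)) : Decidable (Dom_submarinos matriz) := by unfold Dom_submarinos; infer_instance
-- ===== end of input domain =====

-- B replaces A's per-cell scan over all placed lighthouses (rebuilding each one's 5x5 area list)
-- by a boolean lit-cell grid stamped once per lighthouse: asymptotically faster, same result.

-- ===== PORT A =====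
def comparten_area (submarino : Int × Int) (faro : Int × Int) (filas columnas : Int) : Bool :=
  let x2 := faro.1
  let y2 := faro.2
  let area := (PySem.List.pyRange (max 0 (x2 - 2)) (min filas (x2 + 3)) 1).flatMap
      (fun x => (PySem.List.pyRange (max 0 (y2 - 2)) (min columnas (y2 + 3)) 1).map (fun y => (x, y)))
  area.contains submarino

def esta_iluminado (submarino : Int × Int) (faros : List (Int × Int)) (filas columnas : Int) : Bool :=
  if faros.length == 0 then false
  else faros.any (fun faro => comparten_area submarino faro filas columnas)

-- the body of A's inner loop (one cell), and one row of A's outer loop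
def stepA (matriz : List (List Int)) (filas columnas i : Int)
    (faros : List (Int × Int)) (j : Int) : List (Int × Int) :=
  let submarino := PySem.List.pyGetD (PySem.List.pyGetD matriz i []) j 0
  if (submarino != 0) && !(esta_iluminado (i, j) faros filas columnas) then
    if (decide (i + 2 < filas)) && (decide (j + 2 < columnas)) then faros ++ [(i + 2, j + 2)]
    else faros ++ [(i, j)]
  else faros

def rowA (matriz : List (List Int)) (filas columnas : Int)
    (faros : List (Int × Int)) (i : Int) : List (Int × Int) :=
  (PySem.List.pyRange 0 columnas 1).foldl (stepA matriz filas columnas i) faros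

def submarinos (matriz : List (List Int)) : List (Int × Int) :=
  if matriz.length == 0 then []
  else
    let filas : Int := matriz.length
    let columnas : Int := (matriz.headD []).length
    (PySem.List.pyRange 0 filas 1).foldl (rowA matriz filas columnas) []

-- ===== PORT B =====
-- B's lit grid is a list of boolean rows; 'fila_lit[b] = True' is PySem.List.pySetD.
-- '[False] * columnas' with columnas = len(matriz[0]) ≥ 0 is exactly List.replicate.
def stampFilaB (fila_lit : List Bool) (y columnas : Int) : List Bool :=
  (PySem.List.pyRange (max 0 (y - 2)) (min columnas (y + 3)) 1).foldl
    (fun r b => PySem.List.pySetD r b true) fila_lit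

def stampB (lit : List (List Bool)) (x y filas columnas : Int) : List (List Bool) :=
  (PySem.List.pyRange (max 0 (x - 2)) (min filas (x + 3)) 1).foldl
    (fun g a => PySem.List.pySetD g a (stampFilaB (PySem.List.pyGetD g a []) y columnas)) lit

-- one cell of B (state = (faros, lit)), then one enumerated row of B
def celdaB (filas columnas i : Int) (fila : List Int)
    (st : List (Int × Int) × List (List Bool)) (j : Int) :
    List (Int × Int) × List (List Bool) :=
  if (PySem.List.pyGetD fila j 0 != 0) &&
     !(PySem.List.pyGetD (PySem.List.pyGetD st.2 i []) j false) then
    let xy := if (decide (i + 2 < filas)) && (decide (j + 2 < columnas)) then (i + 2, j + 2) else (i, j)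
    (st.1 ++ [xy], stampB st.2 xy.1 xy.2 filas columnas)
  else st

def filaB (filas columnas : Int) (st : List (Int × Int) × List (List Bool))
    (ifila : Int × List Int) : List (Int × Int) × List (List Bool) :=
  (PySem.List.pyRange 0 columnas 1).foldl (celdaB filas columnas ifila.1 ifila.2) st

def submarinos_alt (matriz : List (List Int)) : List (Int × Int) :=
  if matriz.length == 0 then []
  else
    let filas : Int := matriz.length
    let columnas : Int := (matriz.headD []).length
    let lit0 := (PySem.List.pyRange 0 filas 1).map (fun _ => List.replicate columnas.toNat false)
    ((PySem.List.enumerate matriz 0).foldl (filaB filas columnas) ([], lit0)).1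

-- ===== PRECONDITION & SPEC =====
-- Pre_ excludes exactly the inputs where A raises: a row shorter than the first row
-- (A indexes matriz[i][j] for every j < len(matriz[0]), an IndexError there).
def Pre_submarinos (matriz : List (List Int)) : Prop :=
  ∀ row ∈ matriz, (matriz.headD []).length ≤ row.length

instance (matriz : List (List Int)) : Decidable (Pre_submarinos matriz) := by
  unfold Pre_submarinos; infer_instance

def pvWitness_submarinos : List (List Int) := [[1, 0, 0], [0, 0, 1]]

def Spec_submarinos (matriz : List (List Int)) (out : List (Int × Int)) : Prop := out = submarinos_alt matriz
instance (matriz : List (List Int)) (out : List (Int × Int)) : Decidable (Spec_submarinos matriz out) := by unfold Spec_submarinos; infer_instance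

-- ===== CLAIM (what is proved, stated in full; the proofs are below) =====
def Claim_equal_submarinos : Prop := ∀ (matriz : List (List Int)), Dom_submarinos matriz → Pre_submarinos matriz → Spec_submarinos matriz (submarinos matriz)

-- ===== LEMMAS AND PROOFS =====

-- grid shape: 'filas' rows, each of length 'columnas'
def Shp (filas columnas : Int) (lit : List (List Bool)) : Prop :=
  lit.length = filas.toNat ∧ ∀ r ∈ lit, r.length = columnas.toNat

-- the invariant: for every in-grid cell, the lit-grid bit coincides with A's scan
def InvL (filas columnas : Int) (faros : List (Int × Int)) (lit : List (List Bool)) : Prop :=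
  Shp filas columnas lit ∧
  ∀ a b : Int, 0 ≤ a → a < filas → 0 ≤ b → b < columnas →
    PySem.List.pyGetD (PySem.List.pyGetD lit a []) b false =
      esta_iluminado (a, b) faros filas columnas

lemma esta_eq_any (s : Int × Int) (fs : List (Int × Int)) (filas columnas : Int) :
    esta_iluminado s fs filas columnas = fs.any (fun f => comparten_area s f filas columnas) := by
  cases fs <;> simp [esta_iluminado]

lemma comparten_area_eq (a b x y filas columnas : Int) :
    comparten_area (a, b) (x, y) filas columnas =
      ((decide (max 0 (x - 2) ≤ a)) && (decide (a < min filas (x + 3))) &&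
       ((decide (max 0 (y - 2) ≤ b)) && (decide (b < min columnas (y + 3))))) := by
  simp [comparten_area, PySem.List.mem_pyRange_one, Prod.ext_iff]

lemma esta_append (s : Int × Int) (fs : List (Int × Int)) (f : Int × Int) (filas columnas : Int) :
    esta_iluminado s (fs ++ [f]) filas columnas =
      (esta_iluminado s fs filas columnas || comparten_area s f filas columnas) := by
  simp [esta_eq_any]

-- row-level: a fold of 'fila_lit[b] = True' writes at nonneg indices
lemma foldl_pySetD_length (idxs : List Int) (row : List Bool) :
    (idxs.foldl (fun r b => PySem.List.pySetD r b true) row).length = row.length := by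
  induction idxs generalizing row with
  | nil => rfl
  | cons b t ih => simp [ih, PySem.List.length_pySetD]

lemma pyGetD_set_true (row : List Bool) (b k : Int) (hb : 0 ≤ b)
    (hk0 : 0 ≤ k) (hkl : k < (row.length : Int)) :
    PySem.List.pyGetD (PySem.List.pySetD row b true) k false =
      (if k = b then true else PySem.List.pyGetD row k false) := by
  rw [PySem.List.pySetD_of_nonneg row true hb]
  have hlen : (k < ((row.set b.toNat true).length : Int)) := by simpa using hkl
  rw [PySem.List.pyGetD_eq_getElem _ false hk0 hlen, PySem.List.pyGetD_eq_getElem _ false hk0 hkl]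
  rw [List.getElem_set]
  by_cases hkb : k = b
  · subst hkb
    simp
  · have hne : b.toNat ≠ k.toNat := by omega
    simp [hne, hkb]

lemma foldl_pySetD_get (idxs : List Int) (hpos : ∀ b ∈ idxs, 0 ≤ b) :
    ∀ (row : List Bool) (k : Int), 0 ≤ k → k < (row.length : Int) →
    PySem.List.pyGetD (idxs.foldl (fun r b => PySem.List.pySetD r b true) row) k false =
      (PySem.List.pyGetD row k false || idxs.contains k) := by
  induction idxs with
  | nil => intro row k _ _; simp
  | cons b t ih =>
    intro row k hk0 hkl
    have hb := hpos b (List.mem_cons_self ..)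
    have ht := ih (fun x hx => hpos x (List.mem_cons_of_mem _ hx))
    simp only [List.foldl_cons]
    rw [ht _ k hk0 (by simpa [PySem.List.length_pySetD] using hkl),
        pyGetD_set_true row b k hb hk0 hkl]
    by_cases hkb : k = b
    · subst hkb; simp
    · simp [hkb]

lemma pyRange_contains (lo hi k : Int) :
    (PySem.List.pyRange lo hi 1).contains k = ((decide (lo ≤ k)) && (decide (k < hi))) := by
  rw [Bool.eq_iff_iff]
  simp [PySem.List.mem_pyRange_one]

lemma stampFila_length (fila_lit : List Bool) (y columnas : Int) :
    (stampFilaB fila_lit y columnas).length = fila_lit.length :=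
  foldl_pySetD_length _ _

lemma stampFila_get (fila_lit : List Bool) (y columnas b : Int)
    (hb0 : 0 ≤ b) (hbl : b < (fila_lit.length : Int)) :
    PySem.List.pyGetD (stampFilaB fila_lit y columnas) b false =
      (PySem.List.pyGetD fila_lit b false ||
        ((decide (max 0 (y - 2) ≤ b)) && (decide (b < min columnas (y + 3))))) := by
  unfold stampFilaB
  rw [foldl_pySetD_get _ (fun x hx => ((PySem.List.mem_pyRange_one.mp hx).1.trans' (by positivity)).trans' (le_refl _)) _ b hb0 hbl]
  rw [pyRange_contains]

-- grid-level: one stamped row, then the whole clipped box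
lemma stamp_step_shape (filas columnas y a : Int) (ha0 : 0 ≤ a) (haf : a < filas)
    (g : List (List Bool)) (hg : Shp filas columnas g) :
    Shp filas columnas
      (PySem.List.pySetD g a (stampFilaB (PySem.List.pyGetD g a []) y columnas)) := by
  obtain ⟨hlen, hrows⟩ := hg
  have hal : a < (g.length : Int) := by omega
  have hmem : PySem.List.pyGetD g a ([] : List Bool) ∈ g := by
    rw [PySem.List.pyGetD_eq_getElem _ _ ha0 hal]
    exact List.getElem_mem _
  constructor
  · simpa [PySem.List.length_pySetD] using hlen
  · intro r hr
    rw [PySem.List.pySetD_of_nonneg g _ ha0] at hr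
    rcases List.mem_or_eq_of_mem_set hr with hold | hnew
    · exact hrows r hold
    · rw [hnew, stampFila_length]
      exact hrows _ hmem

lemma stamp_step_get (filas columnas y a : Int) (ha0 : 0 ≤ a) (haf : a < filas)
    (g : List (List Bool)) (hg : Shp filas columnas g) (a0 b0 : Int)
    (ha00 : 0 ≤ a0) (ha0f : a0 < filas) (hb00 : 0 ≤ b0) (hb0c : b0 < columnas) :
    PySem.List.pyGetD (PySem.List.pyGetD
        (PySem.List.pySetD g a (stampFilaB (PySem.List.pyGetD g a []) y columnas)) a0 []) b0 false =
      (PySem.List.pyGetD (PySem.List.pyGetD g a0 []) b0 false ||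
        ((decide (a0 = a)) &&
         ((decide (max 0 (y - 2) ≤ b0)) && (decide (b0 < min columnas (y + 3)))))) := by
  obtain ⟨hlen, hrows⟩ := hg
  have hal : a < (g.length : Int) := by omega
  have ha0l : a0 < (g.length : Int) := by omega
  have hrowa : PySem.List.pyGetD g a ([] : List Bool) ∈ g := by
    rw [PySem.List.pyGetD_eq_getElem _ _ ha0 hal]; exact List.getElem_mem _
  rw [PySem.List.pySetD_of_nonneg g _ ha0]
  have hset : a0 < (((g.set a.toNat (stampFilaB (PySem.List.pyGetD g a []) y columnas))).length : Int) := by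
    simpa using ha0l
  rw [PySem.List.pyGetD_eq_getElem _ ([] : List Bool) ha00 hset, List.getElem_set]
  by_cases heq : a0 = a
  · have : a.toNat = a0.toNat := by omega
    rw [if_pos this]
    have hblen : b0 < (((PySem.List.pyGetD g a ([] : List Bool)).length : Int)) := by
      rw [hrows _ hrowa]; omega
    rw [stampFila_get _ y columnas b0 hb00 hblen]
    simp [heq]
  · have : a.toNat ≠ a0.toNat := by omega
    rw [if_neg this]
    rw [PySem.List.pyGetD_eq_getElem g ([] : List Bool) ha00 ha0l]
    simp [heq]

lemma stamp_fold_shape (filas columnas y : Int) (idxs : List Int)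
    (hidx : ∀ a ∈ idxs, 0 ≤ a ∧ a < filas) :
    ∀ (g : List (List Bool)), Shp filas columnas g →
    Shp filas columnas (idxs.foldl
      (fun g a => PySem.List.pySetD g a (stampFilaB (PySem.List.pyGetD g a []) y columnas)) g) := by
  induction idxs with
  | nil => intro g hg; exact hg
  | cons a t ih =>
    intro g hg
    obtain ⟨ha0, haf⟩ := hidx a (List.mem_cons_self ..)
    exact ih (fun x hx => hidx x (List.mem_cons_of_mem _ hx)) _
      (stamp_step_shape filas columnas y a ha0 haf g hg)

lemma stamp_fold_get (filas columnas y : Int) (idxs : List Int)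
    (hidx : ∀ a ∈ idxs, 0 ≤ a ∧ a < filas) :
    ∀ (g : List (List Bool)), Shp filas columnas g →
    ∀ (a0 b0 : Int), 0 ≤ a0 → a0 < filas → 0 ≤ b0 → b0 < columnas →
    PySem.List.pyGetD (PySem.List.pyGetD (idxs.foldl
        (fun g a => PySem.List.pySetD g a (stampFilaB (PySem.List.pyGetD g a []) y columnas)) g) a0 []) b0 false =
      (PySem.List.pyGetD (PySem.List.pyGetD g a0 []) b0 false ||
        (idxs.contains a0 &&
         ((decide (max 0 (y - 2) ≤ b0)) && (decide (b0 < min columnas (y + 3)))))) := by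
  induction idxs with
  | nil => intro g _ a0 b0 _ _ _ _; simp
  | cons a t ih =>
    intro g hg a0 b0 ha00 ha0f hb00 hb0c
    obtain ⟨ha0, haf⟩ := hidx a (List.mem_cons_self ..)
    simp only [List.foldl_cons]
    rw [ih (fun x hx => hidx x (List.mem_cons_of_mem _ hx)) _
          (stamp_step_shape filas columnas y a ha0 haf g hg) a0 b0 ha00 ha0f hb00 hb0c,
        stamp_step_get filas columnas y a ha0 haf g hg a0 b0 ha00 ha0f hb00 hb0c]
    rw [Bool.eq_iff_iff]
    by_cases heq : a0 = a
    · simp [heq]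
      tauto
    · simp [heq]

lemma stampB_shape (filas columnas x y : Int) (lit : List (List Bool))
    (hg : Shp filas columnas lit) : Shp filas columnas (stampB lit x y filas columnas) := by
  unfold stampB
  exact stamp_fold_shape filas columnas y _
    (fun a ha => by
      have := PySem.List.mem_pyRange_one.mp ha
      constructor <;> omega) lit hg

lemma stampB_get (filas columnas x y : Int) (lit : List (List Bool))
    (hg : Shp filas columnas lit) (a0 b0 : Int)
    (ha00 : 0 ≤ a0) (ha0f : a0 < filas) (hb00 : 0 ≤ b0) (hb0c : b0 < columnas) :
    PySem.List.pyGetD (PySem.List.pyGetD (stampB lit x y filas columnas) a0 []) b0 false =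
      (PySem.List.pyGetD (PySem.List.pyGetD lit a0 []) b0 false ||
        comparten_area (a0, b0) (x, y) filas columnas) := by
  unfold stampB
  rw [stamp_fold_get filas columnas y _
    (fun a ha => by
      have := PySem.List.mem_pyRange_one.mp ha
      constructor <;> omega) lit hg a0 b0 ha00 ha0f hb00 hb0c]
  rw [pyRange_contains, comparten_area_eq]

-- one cell: B's step returns A's faros and preserves the invariant
lemma celda_eq (matriz : List (List Int)) (filas columnas i j : Int)
    (fila : List Int) (hfila : fila = PySem.List.pyGetD matriz i [])
    (hi0 : 0 ≤ i) (hif : i < filas) (hj0 : 0 ≤ j) (hjc : j < columnas)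
    (faros : List (Int × Int)) (lit : List (List Bool))
    (hInv : InvL filas columnas faros lit) :
    (celdaB filas columnas i fila (faros, lit) j).1 = stepA matriz filas columnas i faros j ∧
    InvL filas columnas (stepA matriz filas columnas i faros j)
      (celdaB filas columnas i fila (faros, lit) j).2 := by
  obtain ⟨hShp, hPt⟩ := hInv
  have hc : PySem.List.pyGetD (PySem.List.pyGetD lit i []) j false =
      esta_iluminado (i, j) faros filas columnas := hPt i j hi0 hif hj0 hjc
  simp only [celdaB, stepA, hfila, hc]
  by_cases hcond : ((PySem.List.pyGetD (PySem.List.pyGetD matriz i []) j 0 != 0) &&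
      !(esta_iluminado (i, j) faros filas columnas)) = true
  · simp only [hcond, if_pos]
    by_cases hin : ((decide (i + 2 < filas)) && (decide (j + 2 < columnas))) = true
    · simp only [hin, if_pos]
      refine ⟨by trivial, stampB_shape _ _ _ _ _ hShp, ?_⟩
      intro a b ha0 haf hb0 hbc
      rw [stampB_get filas columnas _ _ lit hShp a b ha0 haf hb0 hbc,
          hPt a b ha0 haf hb0 hbc, esta_append]
    · simp only [Bool.not_eq_true] at hin
      simp only [hin, Bool.false_eq_true, if_false]
      refine ⟨by trivial, stampB_shape _ _ _ _ _ hShp, ?_⟩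
      intro a b ha0 haf hb0 hbc
      rw [stampB_get filas columnas _ _ lit hShp a b ha0 haf hb0 hbc,
          hPt a b ha0 haf hb0 hbc, esta_append]
  · simp only [Bool.not_eq_true] at hcond
    simp only [hcond, Bool.false_eq_true, if_false]
    exact ⟨by trivial, hShp, hPt⟩

-- one row, cell by cell
lemma cells_eq (matriz : List (List Int)) (filas columnas i : Int)
    (fila : List Int) (hfila : fila = PySem.List.pyGetD matriz i [])
    (hi0 : 0 ≤ i) (hif : i < filas) (js : List Int)
    (hmem : ∀ j ∈ js, 0 ≤ j ∧ j < columnas) :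
    ∀ (faros : List (Int × Int)) (lit : List (List Bool)),
      InvL filas columnas faros lit →
      (js.foldl (celdaB filas columnas i fila) (faros, lit)).1 =
        js.foldl (stepA matriz filas columnas i) faros ∧
      InvL filas columnas (js.foldl (stepA matriz filas columnas i) faros)
        (js.foldl (celdaB filas columnas i fila) (faros, lit)).2 := by
  induction js with
  | nil => intro faros lit hInv; exact ⟨rfl, hInv⟩
  | cons j t ih =>
    intro faros lit hInv
    obtain ⟨hj0, hjc⟩ := hmem j (List.mem_cons_self ..)
    obtain ⟨h1, h2⟩ := celda_eq matriz filas columnas i j fila hfila hi0 hif hj0 hjc faros lit hInv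
    have ht := ih (fun j hj => hmem j (List.mem_cons_of_mem _ hj))
    simp only [List.foldl_cons]
    have hst : celdaB filas columnas i fila (faros, lit) j =
        ((celdaB filas columnas i fila (faros, lit) j).1,
         (celdaB filas columnas i fila (faros, lit) j).2) := rfl
    rw [hst, h1]
    exact ht _ _ h2

-- the outer loops: B's enumerate pass versus A's indexed range pass
lemma rows_eq (matriz : List (List Int)) (filas columnas : Int)
    (hfilas : filas = (matriz.length : Int)) :
    ∀ (rows : List (List Int)) (s : Nat), matriz.drop s = rows →
    ∀ (faros : List (Int × Int)) (lit : List (List Bool)),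
      InvL filas columnas faros lit →
      ((PySem.List.enumerate rows (s : Int)).foldl (filaB filas columnas) (faros, lit)).1 =
        (PySem.List.pyRange (s : Int) filas 1).foldl (rowA matriz filas columnas) faros ∧
      InvL filas columnas
        ((PySem.List.pyRange (s : Int) filas 1).foldl (rowA matriz filas columnas) faros)
        ((PySem.List.enumerate rows (s : Int)).foldl (filaB filas columnas) (faros, lit)).2 := by
  intro rows
  induction rows with
  | nil =>
    intro s hdrop faros lit hInv
    have hle : matriz.length ≤ s := List.drop_eq_nil_iff.mp hdrop
    rw [PySem.List.pyRange_one_eq_nil (by omega)]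
    exact ⟨rfl, hInv⟩
  | cons fila rest ih =>
    intro s hdrop faros lit hInv
    have hs : s < matriz.length := by
      by_contra h
      rw [List.drop_eq_nil_of_le (by omega)] at hdrop
      simp at hdrop
    have hfila : fila = PySem.List.pyGetD matriz (s : Int) [] := by
      have h0 : matriz[s]'hs = fila := by
        have h1 : (matriz.drop s)[0]'(by simp [hdrop]) = fila := by simp [hdrop]
        rw [List.getElem_drop] at h1
        simpa using h1
      rw [PySem.List.pyGetD_eq_getElem matriz ([] : List Int) (by positivity) (by exact_mod_cast hs)]
      simp [h0.symm]
    have hdrop' : matriz.drop (s + 1) = rest := by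
      have h2 := congrArg List.tail hdrop
      simpa [List.tail_drop] using h2
    have hcast : ((s + 1 : Nat) : Int) = (s : Int) + 1 := by push_cast; ring
    rw [PySem.List.enumerate_cons, PySem.List.pyRange_one_cons (by omega : (s : Int) < filas)]
    simp only [List.foldl_cons]
    have hjs : ∀ j ∈ PySem.List.pyRange 0 columnas 1, 0 ≤ j ∧ j < columnas :=
      fun j hj => PySem.List.mem_pyRange_one.mp hj
    obtain ⟨h1, h2⟩ := cells_eq matriz filas columnas (s : Int) fila hfila (by positivity)
      (by omega) _ hjs faros lit hInv
    have hst : filaB filas columnas (faros, lit) ((s : Int), fila) =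
        ((filaB filas columnas (faros, lit) ((s : Int), fila)).1,
         (filaB filas columnas (faros, lit) ((s : Int), fila)).2) := rfl
    rw [hst]
    have h1' : (filaB filas columnas (faros, lit) ((s : Int), fila)).1 =
        rowA matriz filas columnas faros (s : Int) := h1
    rw [h1']
    have h2' : InvL filas columnas (rowA matriz filas columnas faros (s : Int))
        (filaB filas columnas (faros, lit) ((s : Int), fila)).2 := h2
    have hrest := ih (s + 1) hdrop' (rowA matriz filas columnas faros (s : Int))
      (filaB filas columnas (faros, lit) ((s : Int), fila)).2 h2'
    rw [hcast] at hrest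
    exact hrest

-- the initial lit grid satisfies the invariant with no lighthouses placed
lemma InvL_init (filas columnas : Int) (h0 : 0 ≤ filas) :
    InvL filas columnas []
      ((PySem.List.pyRange 0 filas 1).map (fun _ => List.replicate columnas.toNat false)) := by
  have hlen : ((PySem.List.pyRange 0 filas 1).map
      (fun _ => List.replicate columnas.toNat false)).length = filas.toNat := by
    simp [PySem.List.length_pyRange_one]
  refine ⟨⟨hlen, ?_⟩, ?_⟩
  · intro r hr
    rcases List.mem_map.mp hr with ⟨_, _, rfl⟩
    simp
  · intro a b ha0 haf hb0 hbc
    have hal : a < (((PySem.List.pyRange 0 filas 1).map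
        (fun _ => List.replicate columnas.toNat false)).length : Int) := by
      rw [hlen]; omega
    rw [PySem.List.pyGetD_eq_getElem _ ([] : List Bool) ha0 hal]
    rw [List.getElem_map]
    have hbl : b < ((List.replicate columnas.toNat false).length : Int) := by
      simp; omega
    rw [PySem.List.pyGetD_eq_getElem _ false hb0 hbl]
    simp [esta_iluminado]

-- ===== VERDICT (by name: the statement is the Claim_ definition above) =====
theorem submarinos_spec : Claim_equal_submarinos := by
  intro matriz _ _
  unfold Spec_submarinos submarinos submarinos_alt
  by_cases h : (matriz.length == 0) = true
  · simp [h]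
  · simp only [h, Bool.false_eq_true, if_false]
    have hInv0 := InvL_init (matriz.length : Int) ((matriz.headD []).length : Int) (by positivity)
    have hmain := rows_eq matriz (matriz.length : Int) ((matriz.headD []).length : Int) rfl
      matriz 0 List.drop_zero [] _ hInv0
    have hcast : ((0 : Nat) : Int) = (0 : Int) := rfl
    rw [hcast] at hmain
    exact hmain.1.symm
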